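-- pv_equiv track=rewrite | github.com/AshwinVishwanath/C.A.S.P.E.R.-2 | tools/casper_decode.py | _fsm_spans
-- ===== SOURCE A (Python) =====
-- def _fsm_spans(times, states):
--     """Build (start, end, state) spans from parallel time/state arrays."""
--     spans = []
--     if not times:
--         return spans
--     cur_state = states[0]
--     span_start = times[0]
--     for t, s in zip(times[1:], states[1:]):
--         if s != cur_state:
--             spans.append((span_start, t, cur_state))
--             cur_state = s
--             span_start = t
--     spans.append((span_start, times[-1], cur_state))
--     return spans
-- ===== SOURCE B (Python) =====
-- def _fsm_spans(times, states):
--     """Build (start, end, state) spans from parallel time/state arrays."""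
--     if not times:
--         return []
--     n = min(len(times), len(states))
--     bounds = [i for i in range(1, n) if states[i] != states[i - 1]]
--     spans = []
--     start = 0
--     for i in bounds:
--         spans.append((times[start], times[i], states[start]))
--         start = i
--     spans.append((times[start], times[-1], states[start]))
--     return spans
-- ===== Notes on version B (the rewrite author's own statement) =====
-- stated objective: alternative
-- what changed: B first builds the list of change indices (where states[i] != states[i-1]) over the min-length prefix, then folds over that boundary list with a start index to emit spans, instead of A's single pass over zip(times[1:], states[1:]) carrying cur_state/span_start values.
import Mathlib
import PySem

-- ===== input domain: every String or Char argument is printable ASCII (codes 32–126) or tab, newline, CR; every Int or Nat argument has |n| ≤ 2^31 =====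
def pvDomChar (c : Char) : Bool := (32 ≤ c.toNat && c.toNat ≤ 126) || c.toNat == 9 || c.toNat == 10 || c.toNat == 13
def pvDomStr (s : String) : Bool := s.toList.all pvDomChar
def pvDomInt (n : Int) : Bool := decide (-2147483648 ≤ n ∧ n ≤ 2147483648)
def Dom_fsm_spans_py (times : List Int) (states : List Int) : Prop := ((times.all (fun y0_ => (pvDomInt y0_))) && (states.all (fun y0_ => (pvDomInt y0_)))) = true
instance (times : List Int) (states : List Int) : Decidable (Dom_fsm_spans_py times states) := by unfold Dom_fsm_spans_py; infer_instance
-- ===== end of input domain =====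

-- B builds a boundary-index list first, then folds over it with a start index; an alternative decomposition of the same O(n) task (not claimed faster).


-- ===== PORT A =====
-- One step of A's for-loop body over a pair (t, s); state = (spans, cur_state, span_start).
def afoldStep (acc : List (Int × Int × Int) × Int × Int) (p : Int × Int) :
    List (Int × Int × Int) × Int × Int :=
  if p.2 ≠ acc.2.1 then (acc.1 ++ [(acc.2.2, p.1, acc.2.1)], p.2, p.1) else acc

def fsm_spans_py (times : List Int) (states : List Int) : List (Int × Int × Int) :=
  match times, states with
  | [], _ => []                       -- if not times: return spans (= [])
  | _ :: _, [] => []                  -- Python raises IndexError at states[0]; excluded by Pre_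
  | t0 :: _, s0 :: _ =>
    -- for t, s in zip(times[1:], states[1:]): …
    let r := ((times.drop 1).zip (states.drop 1)).foldl afoldStep ([], s0, t0)
    -- spans.append((span_start, times[-1], cur_state))  (times nonempty here, so times[-1] = last)
    r.1 ++ [(r.2.2, times.getLastD 0, r.2.1)]

-- ===== PORT B =====
-- One step of B's for-loop over the boundary list; state = (spans, start).
-- Indices start/i are in range whenever Python's lookups succeed, so getD's default is never used there.
def bfoldStep (times : List Int) (states : List Int)
    (acc : List (Int × Int × Int) × Nat) (i : Nat) : List (Int × Int × Int) × Nat :=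
  (acc.1 ++ [(times.getD acc.2 0, times.getD i 0, states.getD acc.2 0)], i)

def fsm_spans_py_alt (times : List Int) (states : List Int) : List (Int × Int × Int) :=
  if times = [] then []
  else
    let n := min times.length states.length
    -- bounds = [i for i in range(1, n) if states[i] != states[i-1]]
    let bounds := (List.range' 1 (n - 1)).filter (fun i => states.getD i 0 ≠ states.getD (i - 1) 0)
    let r := bounds.foldl (bfoldStep times states) ([], 0)
    r.1 ++ [(times.getD r.2 0, times.getLastD 0, states.getD r.2 0)]

-- ===== PRECONDITION & SPEC =====
-- Pre_ excludes exactly the inputs where A raises IndexError (times nonempty, states empty);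
-- B raises the same IndexError there.
def Pre_fsm_spans_py (times : List Int) (states : List Int) : Prop :=
  times = [] ∨ states ≠ []
instance (times : List Int) (states : List Int) : Decidable (Pre_fsm_spans_py times states) := by
  unfold Pre_fsm_spans_py; infer_instance

def pvWitness_fsm_spans_py : List Int × List Int := ([0, 1, 2, 3], [5, 5, 6, 6])

def Spec_fsm_spans_py (times : List Int) (states : List Int) (out : List (Int × Int × Int)) : Prop := out = fsm_spans_py_alt times states
instance (times : List Int) (states : List Int) (out : List (Int × Int × Int)) : Decidable (Spec_fsm_spans_py times states out) := by unfold Spec_fsm_spans_py; infer_instance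

-- ===== CLAIM (what is proved, stated in full; the proofs are below) =====
def Claim_equal_fsm_spans_py : Prop := ∀ (times : List Int) (states : List Int), Dom_fsm_spans_py times states → Pre_fsm_spans_py times states → Spec_fsm_spans_py times states (fsm_spans_py times states)

-- ===== LEMMAS AND PROOFS =====

-- Common reference recursion, indexed: j is the next index to inspect, k the current span start.
def refI (times states : List Int) (n : Nat) (lastT : Int) : Nat → Nat → List (Int × Int × Int)
  | j, k =>
    if _h : j < n then
      if states.getD j 0 ≠ states.getD k 0 then
        (times.getD k 0, times.getD j 0, states.getD k 0) :: refI times states n lastT (j + 1) j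
      else
        refI times states n lastT (j + 1) k
    else
      [(times.getD k 0, lastT, states.getD k 0)]
termination_by j _ => n - j

lemma zip_drop_cons (ts ss : List Int) (j : Nat) (h : j < min ts.length ss.length) :
    (ts.drop j).zip (ss.drop j)
      = (ts.getD j 0, ss.getD j 0) :: (ts.drop (j + 1)).zip (ss.drop (j + 1)) := by
  have ht : j < ts.length := lt_of_lt_of_le h (min_le_left _ _)
  have hs : j < ss.length := lt_of_lt_of_le h (min_le_right _ _)
  rw [List.drop_eq_getElem_cons ht, List.drop_eq_getElem_cons hs, List.zip_cons_cons,
    List.getD_eq_getElem _ _ ht, List.getD_eq_getElem _ _ hs]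

lemma zip_drop_nil (ts ss : List Int) (j : Nat) (h : min ts.length ss.length ≤ j) :
    (ts.drop j).zip (ss.drop j) = [] := by
  rcases le_total ts.length ss.length with hle | hle
  · have : ts.drop j = [] := List.drop_eq_nil_of_le (by omega)
    simp [this]
  · have : ss.drop j = [] := List.drop_eq_nil_of_le (by omega)
    simp [this]

-- A's fold (plus the final append) computes refI.
lemma afold_refI (times states : List Int) (lastT : Int) (j k : Nat)
    (hj : j ≤ min times.length states.length) (hk : k < min times.length states.length) :
    ∀ acc : List (Int × Int × Int),
      (let r := ((times.drop j).zip (states.drop j)).foldl afoldStep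
                  (acc, states.getD k 0, times.getD k 0)
       r.1 ++ [(r.2.2, lastT, r.2.1)])
        = acc ++ refI times states (min times.length states.length) lastT j k := by
  set n := min times.length states.length with hn
  induction' hfi : n - j using Nat.strong_induction_on with m ih generalizing j k
  intro acc
  by_cases hlt : j < n
  · rw [zip_drop_cons times states j (by omega), List.foldl_cons]
    rw [refI]
    simp only [hlt, dif_pos]
    by_cases hne : states.getD j 0 ≠ states.getD k 0
    · rw [if_pos hne]
      have hstep : afoldStep (acc, states.getD k 0, times.getD k 0)
            (times.getD j 0, states.getD j 0)
          = (acc ++ [(times.getD k 0, times.getD j 0, states.getD k 0)],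
              states.getD j 0, times.getD j 0) := by
        unfold afoldStep
        rw [if_pos hne]
      rw [hstep]
      have := ih (n - (j + 1)) (by omega) (j + 1) j (by omega) (by omega) rfl
        (acc ++ [(times.getD k 0, times.getD j 0, states.getD k 0)])
      simpa [List.append_assoc] using this
    · rw [if_neg hne]
      have hstep : afoldStep (acc, states.getD k 0, times.getD k 0)
            (times.getD j 0, states.getD j 0)
          = (acc, states.getD k 0, times.getD k 0) := by
        unfold afoldStep
        rw [if_neg hne]
      rw [hstep]
      exact ih (n - (j + 1)) (by omega) (j + 1) k (by omega) hk rfl acc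
  · rw [zip_drop_nil times states j (by omega)]
    rw [refI]
    simp [hlt]

-- B's fold over the filtered boundary list (plus the final append) computes refI,
-- under the invariant states[j-1] = states[k].
lemma bfold_refI (times states : List Int) (lastT : Int) (j k : Nat)
    (hj1 : 1 ≤ j) (hj : j ≤ min times.length states.length)
    (hk : k < min times.length states.length)
    (hinv : states.getD (j - 1) 0 = states.getD k 0) :
    ∀ acc : List (Int × Int × Int),
      (let r := ((List.range' j (min times.length states.length - j)).filter
                    (fun i => states.getD i 0 ≠ states.getD (i - 1) 0)).foldl
                  (bfoldStep times states) (acc, k)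
       r.1 ++ [(times.getD r.2 0, lastT, states.getD r.2 0)])
        = acc ++ refI times states (min times.length states.length) lastT j k := by
  set n := min times.length states.length with hn
  induction' hfi : n - j using Nat.strong_induction_on with m ih generalizing j k
  intro acc
  rw [← hfi]
  by_cases hlt : j < n
  · have hr : List.range' j (n - j) = j :: List.range' (j + 1) (n - (j + 1)) := by
      have : n - j = (n - (j + 1)) + 1 := by omega
      rw [this, List.range'_succ]
    rw [hr]
    rw [refI]
    simp only [hlt, dif_pos]
    by_cases hne : states.getD j 0 ≠ states.getD k 0
    · have hpred : states.getD j 0 ≠ states.getD (j - 1) 0 := by rw [hinv]; exact hne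
      rw [if_pos hne, List.filter_cons_of_pos (by simpa using hpred), List.foldl_cons]
      have hb : bfoldStep times states (acc, k) j
          = (acc ++ [(times.getD k 0, times.getD j 0, states.getD k 0)], j) := rfl
      rw [hb]
      have := ih (n - (j + 1)) (by omega) (j + 1) j (by omega)
        (by simp) (by omega) (by omega) rfl
        (acc ++ [(times.getD k 0, times.getD j 0, states.getD k 0)])
      simpa [List.append_assoc] using this
    · have hpred : ¬ states.getD j 0 ≠ states.getD (j - 1) 0 := by rw [hinv]; exact hne
      rw [if_neg hne, List.filter_cons_of_neg (by simpa using hpred)]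
      have hinv2 : states.getD (j + 1 - 1) 0 = states.getD k 0 := by
        push Not at hne
        simpa using hne
      exact ih (n - (j + 1)) (by omega) (j + 1) k (by omega) hinv2 (by omega) hk rfl acc
  · have h0 : n - j = 0 := by omega
    rw [h0]
    rw [refI]
    simp [hlt]

-- ===== VERDICT (by name: the statement is the Claim_ definition above) =====
theorem fsm_spans_py_spec : Claim_equal_fsm_spans_py := by
  intro times states _hdom hpre
  unfold Spec_fsm_spans_py
  match times, states with
  | [], _ => simp [fsm_spans_py, fsm_spans_py_alt]
  | t0 :: ts, [] =>
      rcases hpre with h | h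
      · exact absurd h (by simp)
      · exact absurd rfl h
  | t0 :: ts, s0 :: ss =>
      have hk : 0 < min (t0 :: ts).length (s0 :: ss).length := by simp
      have hA := afold_refI (t0 :: ts) (s0 :: ss) ((t0 :: ts).getLastD 0) 1 0
        (by simp) hk []
      have hB := bfold_refI (t0 :: ts) (s0 :: ss) ((t0 :: ts).getLastD 0) 1 0
        (le_refl 1) (by simp) hk (by simp) []
      unfold fsm_spans_py fsm_spans_py_alt
      simp only [List.nil_append, List.getD_cons_zero] at hA hB
      simp only [reduceCtorEq, if_false]
      exact hA.trans hB.symm
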